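-- pv_equiv track=rewrite | github.com/kristiansordal/Advent-of-Code | aoc2020/Day 6/Day6.py | ansPerGroup
-- ===== SOURCE A (Python) =====
-- def ansPerGroup(group):
--     uniqueChar = []
--     ans = 0
--     for char in group:
--         isUnique = True
--         for unique in uniqueChar:
--             if char == unique:
--                 isUnique = False
--                 break
--
--         if isUnique:
--             uniqueChar.append(char)
--             ans += 1
--
--     return ans
-- ===== SOURCE B (Python) =====
-- def ansPerGroup(group):
--     s = sorted(group)
--     if not s:
--         return 0
--     count = 1
--     prev = s[0]
--     for c in s[1:]:
--         if c != prev: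
--             count += 1
--         prev = c
--     return count
-- ===== Notes on version B (the rewrite author's own statement) =====
-- stated objective: alternative
-- what changed: Replaces the nested membership scan over a growing seen-list with sort-then-one-pass counting of adjacent differences.
import Mathlib
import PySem

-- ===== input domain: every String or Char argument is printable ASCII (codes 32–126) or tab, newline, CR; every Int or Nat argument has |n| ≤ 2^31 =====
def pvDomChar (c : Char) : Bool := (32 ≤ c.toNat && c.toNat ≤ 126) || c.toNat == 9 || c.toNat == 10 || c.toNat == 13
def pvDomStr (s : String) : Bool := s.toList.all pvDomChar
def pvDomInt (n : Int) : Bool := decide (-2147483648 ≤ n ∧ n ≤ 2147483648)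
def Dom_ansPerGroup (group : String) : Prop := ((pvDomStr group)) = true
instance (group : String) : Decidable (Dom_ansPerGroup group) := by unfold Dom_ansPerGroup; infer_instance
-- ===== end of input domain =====

-- B replaces A's nested membership scan with sort + one adjacent-comparison pass (alternative decomposition, same result).

-- ===== PORT A =====
-- inner 'for unique in uniqueChar' scan: returns isUnique
def aScan (char : Char) : List Char → Bool
  | [] => true
  | u :: rest => if char == u then false else aScan char rest

def ansPerGroup (group : String) : Int :=
  (group.toList.foldl
    (fun (st : List Char × Int) char =>
      if aScan char st.1 then (st.1 ++ [char], st.2 + 1) else st)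
    ([], 0)).2

-- ===== PORT B =====
def ansPerGroup_alt (group : String) : Int :=
  let s := PySem.List.sorted group.toList (fun x => x) false
  match s with
  | [] => 0
  | h :: t =>
    (t.foldl (fun (st : Int × Char) c => (if c ≠ st.2 then st.1 + 1 else st.1, c)) (1, h)).1

-- ===== PRECONDITION & SPEC =====
def Spec_ansPerGroup (group : String) (out : Int) : Prop := out = ansPerGroup_alt group
instance (group : String) (out : Int) : Decidable (Spec_ansPerGroup group out) := by unfold Spec_ansPerGroup; infer_instance

-- ===== CLAIM (what is proved, stated in full; the proofs are below) =====
def Claim_equal_ansPerGroup : Prop := ∀ (group : String), Dom_ansPerGroup group → Spec_ansPerGroup group (ansPerGroup group)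

-- ===== LEMMAS AND PROOFS =====

theorem aScan_eq_not_mem (c : Char) (u : List Char) : aScan c u = !u.contains c := by
  induction u with
  | nil => rfl
  | cons x xs ih =>
    simp only [aScan, List.contains_cons]
    by_cases h : c = x
    · simp [h]
    · simp [h, ih]

theorem A_loop (l u : List Char) (hnd : u.Nodup) :
    ((l.foldl (fun (st : List Char × Int) char =>
        if aScan char st.1 then (st.1 ++ [char], st.2 + 1) else st) (u, (u.length : Int))).2)
      = (u.length : Int) + ((u.toFinset ∪ l.toFinset).card - u.toFinset.card : Int) := by
  induction l generalizing u with
  | nil => simp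
  | cons c t ih =>
    have hstep : aScan c u = !u.contains c := aScan_eq_not_mem c u
    rw [List.foldl_cons, hstep]
    by_cases hc : c ∈ u
    · simp only [List.contains_eq_mem, hc, decide_true, Bool.not_true, Bool.false_eq_true,
        if_false]
      rw [ih u hnd]
      have : u.toFinset ∪ (c :: t).toFinset = u.toFinset ∪ t.toFinset := by
        simp only [List.toFinset_cons, Finset.union_insert]
        rw [Finset.insert_eq_self.2 (Finset.mem_union_left _ (List.mem_toFinset.2 hc))]
      rw [this]
    · simp only [List.contains_eq_mem, hc, decide_false, Bool.not_false, if_true]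
      have hnd' : (u ++ [c]).Nodup := by
        rw [List.nodup_append]
        refine ⟨hnd, List.nodup_singleton c, ?_⟩
        intro a ha b hb
        rw [List.mem_singleton] at hb
        subst hb
        intro h
        exact hc (h ▸ ha)
      have hlen : ((u ++ [c]).length : Int) = (u.length : Int) + 1 := by simp
      have := ih (u ++ [c]) hnd'
      rw [hlen] at this
      rw [this]
      have hset : (u ++ [c]).toFinset = insert c u.toFinset := by
        simp [List.toFinset_append]
      rw [hset]
      have h1 : insert c u.toFinset ∪ t.toFinset = u.toFinset ∪ (c :: t).toFinset := by
        simp only [List.toFinset_cons, Finset.union_insert, Finset.insert_union]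
      rw [h1]
      have h2 : (insert c u.toFinset).card = u.toFinset.card + 1 := by
        rw [Finset.card_insert_of_notMem (by simpa using hc)]
      rw [h2]
      push_cast
      ring

theorem A_card (l : List Char) :
    (l.foldl (fun (st : List Char × Int) char =>
        if aScan char st.1 then (st.1 ++ [char], st.2 + 1) else st) ([], 0)).2
      = (l.toFinset.card : Int) := by
  have := A_loop l [] List.nodup_nil
  simpa using this

theorem B_loop (l : List Char) (prev : Char) (a : Int)
    (hs : (prev :: l).Pairwise (· ≤ ·)) :
    (l.foldl (fun (st : Int × Char) c => (if c ≠ st.2 then st.1 + 1 else st.1, c)) (a, prev)).1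
      = a + (((prev :: l).toFinset.card : Int) - 1) := by
  induction l generalizing prev a with
  | nil => simp
  | cons c t ih =>
    have hs' : (c :: t).Pairwise (· ≤ ·) := hs.tail
    simp only [List.foldl_cons]
    by_cases hc : c = prev
    · subst hc
      simp only [ne_eq, not_true_eq_false, if_false]
      rw [ih c a hs']
      congr 2
      simp
    · simp only [ne_eq, hc, not_false_eq_true, if_true]
      rw [ih c (a + 1) hs']
      have hprev_lt : prev < c := lt_of_le_of_ne (List.rel_of_pairwise_cons hs (List.mem_cons_self)) (Ne.symm hc)
      have hnotmem : prev ∉ (c :: t).toFinset := by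
        simp only [List.toFinset_cons, Finset.mem_insert, List.mem_toFinset]
        rintro (h | h)
        · exact hc h.symm
        · exact absurd (lt_of_lt_of_le hprev_lt (List.rel_of_pairwise_cons hs' h)) (lt_irrefl _)
      have hcard : ((prev :: (c :: t)).toFinset.card : Int)
          = ((c :: t).toFinset.card : Int) + 1 := by
        rw [List.toFinset_cons, Finset.card_insert_of_notMem hnotmem]
        push_cast; ring
      rw [hcard]; ring

theorem B_card (group : String) :
    ansPerGroup_alt group = (group.toList.toFinset.card : Int) := by
  unfold ansPerGroup_alt
  have hperm : (PySem.List.sorted group.toList (fun x => x) false).Perm group.toList :=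
    PySem.List.sorted_perm group.toList _ _
  have hfin : (PySem.List.sorted group.toList (fun x => x) false).toFinset
      = group.toList.toFinset := List.toFinset_eq_of_perm _ _ hperm
  have hpw : (PySem.List.sorted group.toList (fun x => x) false).Pairwise (· ≤ ·) := by
    simpa using PySem.List.sorted_pairwise group.toList (fun x => x)
  cases hsl : PySem.List.sorted group.toList (fun x => x) false with
  | nil =>
    rw [hsl] at hfin
    simp only [List.toFinset_nil] at hfin
    rw [← hfin]
    simp
  | cons h t =>
    rw [hsl] at hpw hfin
    show (t.foldl (fun (st : Int × Char) c => (if c ≠ st.2 then st.1 + 1 else st.1, c)) (1, h)).1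
        = _
    rw [B_loop t h 1 hpw, ← hfin]
    ring

-- ===== VERDICT (by name: the statement is the Claim_ definition above) =====
theorem ansPerGroup_spec : Claim_equal_ansPerGroup := by
  intro group _
  show ansPerGroup group = ansPerGroup_alt group
  unfold ansPerGroup
  rw [A_card, B_card]
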